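-- pv_equiv track=rewrite | github.com/FlorianRaediker/BwInf38Runde1 | Aufgabe5/aufgabe5.py | add_right
-- ===== SOURCE A (Python) =====
-- from typing import Iterable, Tuple
--
-- def add_right(shape: Tuple[int, int], array: int):
--     x = 0
--     height = shape[0]
--     width = shape[1]
--     row_with_ones = (2 ** width - 1)
--     for y in range(height):
--         row = (array >> (y * width)) & row_with_ones
--         x |= row << (y * width + y + 1)
--     return x
-- ===== SOURCE B (Python) =====
-- def add_right(shape, array):
--     height, width = shape
--     modulus = 2 ** width
--     rows = []
--     q = array
--     for _ in range(height):
--         q, row = divmod(q, modulus)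
--         rows.append(row)
--     x = 0
--     for row in reversed(rows):
--         x = (x << (width + 1)) | (row << 1)
--     return x
-- ===== Notes on version B (the rewrite author's own statement) =====
-- stated objective: alternative
-- what changed: A ORs each masked row into the result at a computed bit offset in one indexed loop; B instead decomposes the integer into a row list with repeated divmod and then rebuilds the result by folding the reversed list MSB-first with shift-and-or, no per-row offset arithmetic.
import Mathlib
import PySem

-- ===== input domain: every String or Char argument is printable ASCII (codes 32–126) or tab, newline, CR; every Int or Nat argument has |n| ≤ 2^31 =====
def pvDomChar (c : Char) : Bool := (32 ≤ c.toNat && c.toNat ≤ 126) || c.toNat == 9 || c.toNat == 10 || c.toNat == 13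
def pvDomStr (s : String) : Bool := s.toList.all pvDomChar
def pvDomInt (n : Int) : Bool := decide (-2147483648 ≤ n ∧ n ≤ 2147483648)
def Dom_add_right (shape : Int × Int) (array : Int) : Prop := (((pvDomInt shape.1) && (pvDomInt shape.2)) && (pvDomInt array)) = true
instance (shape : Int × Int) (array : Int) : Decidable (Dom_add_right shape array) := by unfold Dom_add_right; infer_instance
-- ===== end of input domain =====

-- B repacks the grid by divmod-decomposing the integer into a row list and refolding it
-- MSB-first with shift-and-or (objective: alternative; same asymptotic cost as A).

-- ===== PORT A =====
-- '2 ** width' is ported at width.toNat: for width < 0 together with height > 0 the Python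
-- loop body raises TypeError (float mask) — those inputs are excluded by Pre_add_right,
-- and for height ≤ 0 the mask is never used.
def add_right (shape : Int × Int) (array : Int) : Int :=
  let height := shape.1
  let width := shape.2
  let row_with_ones : Int := 2 ^ width.toNat - 1
  (PySem.List.pyRange 0 height 1).foldl
    (fun x y =>
      let row := PySem.Int.band (array >>> (y * width).toNat) row_with_ones
      PySem.Int.bor x (row <<< (y * width + y + 1).toNat))
    0

-- ===== PORT B =====
def add_right_alt (shape : Int × Int) (array : Int) : Int :=
  let height := shape.1
  let width := shape.2
  let modulus : Int := 2 ^ width.toNat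
  let st :=
    (PySem.List.pyRange 0 height 1).foldl
      (fun (st : Int × List Int) _ =>
        (PySem.Int.floordiv st.1 modulus, st.2 ++ [PySem.Int.mod st.1 modulus]))
      (array, [])
  st.2.reverse.foldl
    (fun (x row : Int) => PySem.Int.bor (x <<< (width + 1).toNat) (row <<< (1:Nat))) 0

-- ===== PRECONDITION & SPEC =====
-- Pre_ excludes exactly the inputs where Python A raises TypeError: a negative width with a
-- positive height ('2 ** width' is a float there and the loop body's '&' fails).
def Pre_add_right (shape : Int × Int) (array : Int) : Prop :=
  0 ≤ shape.2 ∨ shape.1 ≤ 0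

instance (shape : Int × Int) (array : Int) : Decidable (Pre_add_right shape array) := by
  unfold Pre_add_right; infer_instance

def pvWitness_add_right : (Int × Int) × Int := ((3, 2), 45)

def Spec_add_right (shape : Int × Int) (array : Int) (out : Int) : Prop :=
  out = add_right_alt shape array
instance (shape : Int × Int) (array : Int) (out : Int) : Decidable (Spec_add_right shape array out) := by
  unfold Spec_add_right; infer_instance

-- ===== CLAIM (what is proved, stated in full; the proofs are below) =====
def Claim_equal_add_right : Prop :=
  ∀ (shape : Int × Int) (array : Int), Dom_add_right shape array →
    Pre_add_right shape array → Spec_add_right shape array (add_right shape array)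

-- ===== LEMMAS AND PROOFS =====

lemma pv_two_pow_pos (k : Nat) : (0:Int) < 2 ^ k := by positivity

-- Python's  a & (2**W - 1)  is  a % 2**W  (also for negative a; & is two's complement)
lemma pv_band_mask (a : Int) (W : Nat) :
    PySem.Int.band a ((2:Int) ^ W - 1) = a % (2:Int) ^ W := by
  have hp : (0:Nat) < 2 ^ W := Nat.two_pow_pos W
  have h2 : ((2:Int) ^ W) = ((2 ^ W : Nat) : Int) := by push_cast; ring
  have hb : (0:Int) ≤ (2:Int) ^ W - 1 := by
    have := pv_two_pow_pos W; omega
  have hcast : ((2:Int) ^ W - 1).toNat = 2 ^ W - 1 := by omega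
  by_cases ha : 0 ≤ a
  · unfold PySem.Int.band
    rw [if_pos ha, if_pos hb, hcast, Nat.and_two_pow_sub_one_eq_mod, h2]
    push_cast
    rw [Int.toNat_of_nonneg ha]
  · unfold PySem.Int.band
    rw [if_neg ha, if_pos hb, hcast]
    set n : Nat := (-a - 1).toNat with hn
    have han : a = -((n : Int) + 1) := by omega
    rw [Nat.and_comm, Nat.and_two_pow_sub_one_eq_mod]
    have hml : n % 2 ^ W < 2 ^ W := Nat.mod_lt _ hp
    have hdm' : ((2:Int) ^ W) * ((n / 2 ^ W : Nat) : Int) + ((n % 2 ^ W : Nat) : Int)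
        = (n : Int) := by
      rw [h2]; exact_mod_cast Nat.div_add_mod n (2 ^ W)
    have hr0 : (0:Int) ≤ ((n % 2 ^ W : Nat) : Int) := by positivity
    have hrlt : ((n % 2 ^ W : Nat) : Int) < (2:Int) ^ W := by
      rw [h2]; exact_mod_cast hml
    have hval : ((2 ^ W - 1 - n % 2 ^ W : Nat) : Int)
        = (2:Int) ^ W - 1 - ((n % 2 ^ W : Nat) : Int) := by omega
    rw [hval, han]
    have hrepr : -(((n : Int)) + 1)
        = ((2:Int) ^ W - 1 - ((n % 2 ^ W : Nat) : Int))
          + (2:Int) ^ W * (-(((n / 2 ^ W : Nat) : Int)) - 1) := by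
      linear_combination hdm'
    rw [hrepr, Int.add_mul_emod_self_left,
        Int.emod_eq_of_lt (by omega) (by omega)]

-- Python's  a | b  is  a + b  when a < 2^k and b is a multiple of 2^k (both nonnegative)
lemma pv_bor_disjoint (a b : Int) (k : Nat) (ha0 : 0 ≤ a) (ha : a < 2 ^ k)
    (hb0 : 0 ≤ b) (hb : ((2:Int) ^ k) ∣ b) : PySem.Int.bor a b = a + b := by
  rw [PySem.Int.bor_of_nonneg ha0 hb0]
  obtain ⟨c, hc⟩ := hb
  have h2 : ((2:Int) ^ k) = ((2 ^ k : Nat) : Int) := by push_cast; ring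
  have hc0 : 0 ≤ c := by
    have hpk := pv_two_pow_pos k
    nlinarith
  have hcn : c = (c.toNat : Int) := (Int.toNat_of_nonneg hc0).symm
  have hbn : b.toNat = 2 ^ k * c.toNat := by
    have hb' : b = ((2 ^ k * c.toNat : Nat) : Int) := by
      rw [hc]; push_cast [Int.toNat_of_nonneg hc0]; ring
    rw [hb', Int.toNat_natCast]
  have han : a.toNat < 2 ^ k := by omega
  rw [hbn, Nat.lor_comm, ← Nat.two_pow_add_eq_or_of_lt han]
  push_cast [Int.toNat_of_nonneg ha0]
  rw [hc, ← hcn]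
  ring

def pvRow (array : Int) (W y : Nat) : Int := array / (2:Int) ^ (y * W) % (2:Int) ^ W

def pvS (array : Int) (W n : Nat) : Int :=
  ∑ y ∈ Finset.range n, pvRow array W y * (2:Int) ^ (y * (W + 1) + 1)

lemma pvRow_nonneg (array : Int) (W y : Nat) : 0 ≤ pvRow array W y :=
  Int.emod_nonneg _ (ne_of_gt (pv_two_pow_pos W))

lemma pvRow_lt (array : Int) (W y : Nat) : pvRow array W y < (2:Int) ^ W :=
  Int.emod_lt_of_pos _ (pv_two_pow_pos W)

lemma pvS_nonneg (array : Int) (W n : Nat) : 0 ≤ pvS array W n := by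
  unfold pvS
  apply Finset.sum_nonneg
  intro y _
  exact mul_nonneg (pvRow_nonneg array W y) (le_of_lt (pv_two_pow_pos _))

lemma pvS_lt (array : Int) (W n : Nat) : pvS array W n < (2:Int) ^ (n * (W + 1)) := by
  induction n with
  | zero => simp [pvS]
  | succ n ih =>
    unfold pvS at *
    rw [Finset.sum_range_succ]
    have hrow := pvRow_lt array W n
    have hrow0 := pvRow_nonneg array W n
    have hterm : pvRow array W n * (2:Int) ^ (n * (W + 1) + 1)
        ≤ ((2:Int) ^ W - 1) * (2:Int) ^ (n * (W + 1) + 1) := by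
      apply mul_le_mul_of_nonneg_right (by omega) (le_of_lt (pv_two_pow_pos _))
    have hpows : ((2:Int) ^ W - 1) * (2:Int) ^ (n * (W + 1) + 1) + (2:Int) ^ (n * (W + 1))
        ≤ (2:Int) ^ ((n + 1) * (W + 1)) := by
      have h1 : (n + 1) * (W + 1) = n * (W + 1) + 1 + W := by ring
      rw [h1, pow_add, pow_add, pow_add]
      have hW := pv_two_pow_pos W
      have hN := pv_two_pow_pos (n * (W + 1))
      nlinarith
    omega

-- A's loop over range(height) computes pvS
lemma pv_foldA (array : Int) (W n : Nat) :
    (PySem.List.pyRange 0 (n : Int) 1).foldl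
      (fun x y =>
        PySem.Int.bor x
          (PySem.Int.band (array >>> (y * ((W : Nat) : Int)).toNat) ((2:Int) ^ W - 1)
            <<< (y * ((W : Nat) : Int) + y + 1).toNat))
      0
    = pvS array W n := by
  induction n with
  | zero => simp [PySem.List.pyRange_one_eq_nil, pvS]
  | succ n ih =>
    have hc : ((n + 1 : Nat) : Int) = (n : Int) + 1 := by push_cast; ring
    rw [hc, PySem.List.pyRange_one_succ_right (by positivity), List.foldl_append, ih]
    simp only [List.foldl_cons, List.foldl_nil]
    have h1 : ((n : Int) * ((W : Nat) : Int)) = ((n * W : Nat) : Int) := by push_cast; ring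
    have h2 : ((n : Int) * ((W : Nat) : Int) + (n : Int) + 1)
        = ((n * (W + 1) + 1 : Nat) : Int) := by push_cast; ring
    rw [h2, h1, Int.toNat_natCast, Int.toNat_natCast,
        Int.shiftRight_eq_div_pow, pv_band_mask, Int.shiftLeft_eq]
    have h3 : ((2 ^ (n * W) : Nat) : Int) = (2:Int) ^ (n * W) := by push_cast; ring
    rw [h3]
    have hrw : array / (2:Int) ^ (n * W) % (2:Int) ^ W = pvRow array W n := rfl
    rw [hrw]
    rw [pv_bor_disjoint _ _ (n * (W + 1) + 1) (pvS_nonneg array W n)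
      (lt_of_lt_of_le (pvS_lt array W n)
        (pow_le_pow_right₀ (by norm_num) (Nat.le_succ _)))
      (mul_nonneg (pvRow_nonneg array W n) (le_of_lt (pv_two_pow_pos _)))
      (Dvd.intro_left _ rfl)]
    simp only [pvS]
    rw [Finset.sum_range_succ]

-- B's first loop produces the row list (and the fully shifted quotient)
lemma pv_rows (array : Int) (W n : Nat) :
    (PySem.List.pyRange 0 (n : Int) 1).foldl
      (fun (st : Int × List Int) _ =>
        (PySem.Int.floordiv st.1 ((2:Int) ^ W), st.2 ++ [PySem.Int.mod st.1 ((2:Int) ^ W)]))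
      (array, [])
    = (array / (2:Int) ^ (n * W), (List.range n).map (pvRow array W)) := by
  induction n with
  | zero => simp [PySem.List.pyRange_one_eq_nil]
  | succ n ih =>
    have hc : ((n + 1 : Nat) : Int) = (n : Int) + 1 := by push_cast; ring
    rw [hc, PySem.List.pyRange_one_succ_right (by positivity), List.foldl_append, ih]
    simp only [List.foldl_cons, List.foldl_nil]
    rw [PySem.Int.floordiv_eq_ediv_of_pos (pv_two_pow_pos W),
        PySem.Int.mod_eq_emod_of_pos (pv_two_pow_pos W)]
    have hdiv : array / (2:Int) ^ (n * W) / (2:Int) ^ W = array / (2:Int) ^ ((n + 1) * W) := by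
      rw [Int.ediv_ediv_of_nonneg (le_of_lt (pv_two_pow_pos _)), ← pow_add]
      congr 1
      ring
    rw [hdiv, List.range_succ, List.map_append]
    rfl

-- B's second loop refolds the row list into pvS (generalized accumulator)
lemma pv_foldB (array : Int) (W : Nat) :
    ∀ (n : Nat) (acc : Int), 0 ≤ acc →
    (((List.range n).map (pvRow array W)).reverse).foldl
      (fun (x row : Int) =>
        PySem.Int.bor (x <<< (((W : Nat) : Int) + 1).toNat) (row <<< (1:Nat))) acc
    = acc * (2:Int) ^ (n * (W + 1)) + pvS array W n := by
  intro n
  induction n with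
  | zero => intro acc hacc; simp [pvS]
  | succ n ih =>
    intro acc hacc
    rw [List.range_succ, List.map_append, List.reverse_append]
    simp only [List.map_cons, List.map_nil, List.reverse_cons, List.reverse_nil,
      List.nil_append, List.cons_append, List.foldl_cons]
    have hW : (((W : Nat) : Int) + 1).toNat = W + 1 := by omega
    have hstep : PySem.Int.bor (acc <<< (((W : Nat) : Int) + 1).toNat) (pvRow array W n <<< (1:Nat))
        = acc * (2:Int) ^ (W + 1) + pvRow array W n * 2 := by
      rw [hW, Int.shiftLeft_eq, Int.shiftLeft_eq, PySem.Int.bor_comm]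
      rw [pv_bor_disjoint _ _ (W + 1)
        (mul_nonneg (pvRow_nonneg array W n) (by norm_num))
        (by
          have h1 := pvRow_lt array W n
          have h2 := pvRow_nonneg array W n
          have h3 : pvRow array W n * 2 ^ (1:Nat) = pvRow array W n * 2 := by norm_num
          rw [h3, pow_succ]
          nlinarith)
        (mul_nonneg hacc (le_of_lt (pv_two_pow_pos _)))
        (Dvd.intro_left _ rfl)]
      ring
    rw [hstep, ih _ (by
      have h1 := pvRow_nonneg array W n
      have h2 := pv_two_pow_pos (W + 1)
      nlinarith)]
    simp only [pvS]
    rw [Finset.sum_range_succ]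
    have h1 : (n + 1) * (W + 1) = n * (W + 1) + (W + 1) := by ring
    rw [h1, pow_add, pow_succ]
    ring

-- ===== VERDICT (by name: the statement is the Claim_ definition above) =====
theorem add_right_spec : Claim_equal_add_right := by
  intro shape array _ hpre
  obtain ⟨h, w⟩ := shape
  unfold Spec_add_right add_right add_right_alt
  by_cases hh : h ≤ 0
  · simp [PySem.List.pyRange_one_eq_nil hh]
  · have hw : 0 ≤ w := by
      rcases hpre with hw | hh' <;> [exact hw; omega]
    obtain ⟨W, rfl⟩ := Int.eq_ofNat_of_zero_le hw
    have hh0 : 0 ≤ h := by omega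
    obtain ⟨n, rfl⟩ := Int.eq_ofNat_of_zero_le hh0
    simp only [Int.toNat_natCast]
    rw [pv_foldA array W n, pv_rows array W n]
    dsimp only
    rw [pv_foldB array W n 0 le_rfl]
    simp
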